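-- pv_equiv track=rewrite | github.com/toxgame6-cpu/SMS | fix_all_templates.py | fix_split_tags
-- ===== SOURCE A (Python) =====
-- def fix_split_tags(content):
--     """Fix Django tags split across multiple lines."""
--     result = []
--     i = 0
--     while i < len(content):
--         if i < len(content) - 1 and content[i] == '{' and content[i+1] == '%':
--             tag_start = i
--             j = i + 2
--             while j < len(content) - 1:
--                 if content[j] == '%' and content[j+1] == '}':
--                     tag = content[tag_start:j+2]
--                     # Collapse all whitespace inside tag to single spaces
--                     fixed = '{%' + ' '.join(tag[2:-2].split()) + ' %}'
--                     result.append(fixed)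
--                     i = j + 2
--                     break
--                 j += 1
--             else:
--                 result.append(content[i])
--                 i += 1
--         elif i < len(content) - 1 and content[i] == '{' and content[i+1] == '{':
--             tag_start = i
--             j = i + 2
--             while j < len(content) - 1:
--                 if content[j] == '}' and content[j+1] == '}':
--                     tag = content[tag_start:j+2]
--                     fixed = '{{' + ' '.join(tag[2:-2].split()) + ' }}'
--                     result.append(fixed)
--                     i = j + 2
--                     break
--                 j += 1
--             else:
--                 result.append(content[i])
--                 i += 1
--         else:
--             result.append(content[i])
--             i += 1
--     return ''.join(result)
-- ===== SOURCE B (Python) =====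
-- def fix_split_tags(content):
--     """Fix Django tags split across multiple lines (find-based scan)."""
--     parts = []
--     pos = 0
--     n = len(content)
--     while pos < n:
--         p1 = content.find('{%', pos)
--         p2 = content.find('{{', pos)
--         if p1 == -1 and p2 == -1:
--             parts.append(content[pos:])
--             break
--         p = min(p for p in (p1, p2) if p != -1)
--         parts.append(content[pos:p])
--         if content[p + 1] == '%':
--             close = content.find('%}', p + 2)
--             opener, closer = '{%', ' %}'
--         else:
--             close = content.find('}}', p + 2)
--             opener, closer = '{{', ' }}'
--         if close == -1:
--             parts.append(content[p])
--             pos = p + 1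
--         else:
--             parts.append(opener + ' '.join(content[p + 2:close].split()) + closer)
--             pos = close + 2
--     return ''.join(parts)
-- ===== Notes on version B (the rewrite author's own statement) =====
-- stated objective: faster
-- what changed: A scans character by character with a manual index loop and a nested inner rescan for each closing delimiter; B jumps between tags with str.find (locating the next '{%'/'{{' opener and its closer directly) and copies the untouched text between tags in whole slices.
import Mathlib
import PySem

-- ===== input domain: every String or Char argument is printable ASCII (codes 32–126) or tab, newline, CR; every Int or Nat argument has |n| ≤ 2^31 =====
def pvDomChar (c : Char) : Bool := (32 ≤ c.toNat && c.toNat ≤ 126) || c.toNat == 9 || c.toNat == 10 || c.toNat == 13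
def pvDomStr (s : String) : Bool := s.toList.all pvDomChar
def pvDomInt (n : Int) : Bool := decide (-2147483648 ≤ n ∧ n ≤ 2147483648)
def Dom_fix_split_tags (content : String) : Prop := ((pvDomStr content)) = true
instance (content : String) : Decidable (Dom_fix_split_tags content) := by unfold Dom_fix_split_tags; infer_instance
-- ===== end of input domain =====

-- B replaces A's char-by-char index scan with a str.find()-driven jump scan over whole slices (objective: faster, constant-factor; measured).

-- ===== PORT A =====
-- ' '.join(x.split()) — the whitespace collapse both Pythons write verbatim
def pvCollapse (l : List Char) : List Char :=
  PySem.Chars.join [' '] (PySem.Chars.split₀ l)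

-- A's inner while loop: scan for the first adjacent pair c1,c2 (both chars must fit:
-- j < len-1); some (chars before the pair, chars after the pair) on break, none on exhaustion
def pvScanClose (c1 c2 : Char) : List Char → Option (List Char × List Char)
  | [] => none
  | [_] => none
  | a :: b :: rest =>
    if a = c1 ∧ b = c2 then some ([], rest)
    else
      match pvScanClose c1 c2 (b :: rest) with
      | some (inner, r) => some (a :: inner, r)
      | none => none

-- termination helper for pvLoopA (cited by decreasing_by)
theorem pvScanClose_length {c1 c2 : Char} : ∀ {l inner r : List Char},
    pvScanClose c1 c2 l = some (inner, r) → r.length < l.length := by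
  intro l
  induction l with
  | nil => intro _ _ h; simp [pvScanClose] at h
  | cons a t ih =>
    intro inner r h
    match t with
    | [] => simp [pvScanClose] at h
    | b :: rest =>
      rw [pvScanClose] at h
      split at h
      · simp only [Option.some.injEq, Prod.mk.injEq] at h
        simp [← h.2]
      · cases hrec : pvScanClose c1 c2 (b :: rest) with
        | none => rw [hrec] at h; simp at h
        | some p =>
          rw [hrec] at h
          cases p with
          | mk i2 r2 =>
            simp only [Option.some.injEq, Prod.mk.injEq] at h
            have := ih (inner := i2) (r := r2) hrec
            have : r2.length < rest.length + 1 := by simpa using this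
            simp [← h.2]
            omega

-- A's outer while loop over the remaining characters
def pvLoopA : List Char → List Char
  | [] => []
  | [c] => [c]
  | c1 :: c2 :: rest =>
    if c1 = '{' ∧ c2 = '%' then
      match h : pvScanClose '%' '}' rest with
      | some (inner, r) => '{' :: '%' :: (pvCollapse inner ++ (' ' :: '%' :: '}' :: pvLoopA r))
      | none => c1 :: pvLoopA (c2 :: rest)
    else if c1 = '{' ∧ c2 = '{' then
      match h : pvScanClose '}' '}' rest with
      | some (inner, r) => '{' :: '{' :: (pvCollapse inner ++ (' ' :: '}' :: '}' :: pvLoopA r))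
      | none => c1 :: pvLoopA (c2 :: rest)
    else c1 :: pvLoopA (c2 :: rest)
  termination_by l => l.length
  decreasing_by
  · have := pvScanClose_length h; simp; omega
  · simp
  · have := pvScanClose_length h; simp; omega
  · simp
  · simp

def fix_split_tags (content : String) : String :=
  String.mk (pvLoopA content.toList)

-- ===== PORT B =====
-- Source B's 'min(p for p in (p1, p2) if p != -1)' (called with not both = -1)
def pvMinFound (p1 p2 : Int) : Int :=
  if p1 = -1 then p2 else if p2 = -1 then p1 else min p1 p2

-- Source B's while loop; pos is the cursor, fuel (≥ len - pos + 1 at the call) only makes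
-- the recursion structural
def pvLoopB (cs : List Char) : Nat → Nat → List Char
  | 0, _ => []
  | fuel + 1, pos =>
    if pos < cs.length then
      let p1 := PySem.Chars.findFrom cs ['{', '%'] (pos : Int) none
      let p2 := PySem.Chars.findFrom cs ['{', '{'] (pos : Int) none
      if p1 = -1 ∧ p2 = -1 then
        PySem.List.slice cs (some (pos : Int)) none
      else
        let p := pvMinFound p1 p2
        let pfx := PySem.List.slice cs (some (pos : Int)) (some p)
        if PySem.List.pyGet? cs (p + 1) = some '%' then
          let close := PySem.Chars.findFrom cs ['%', '}'] (p + 2) none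
          if close = -1 then
            pfx ++ (match PySem.List.pyGet? cs p with | some c => [c] | none => [])
                ++ pvLoopB cs fuel (p + 1).toNat
          else
            pfx ++ ('{' :: '%' :: (pvCollapse (PySem.List.slice cs (some (p + 2)) (some close)) ++ [' ', '%', '}']))
                ++ pvLoopB cs fuel (close + 2).toNat
        else
          let close := PySem.Chars.findFrom cs ['}', '}'] (p + 2) none
          if close = -1 then
            pfx ++ (match PySem.List.pyGet? cs p with | some c => [c] | none => [])
                ++ pvLoopB cs fuel (p + 1).toNat
          else
            pfx ++ ('{' :: '{' :: (pvCollapse (PySem.List.slice cs (some (p + 2)) (some close)) ++ [' ', '}', '}']))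
                ++ pvLoopB cs fuel (close + 2).toNat
    else []

def fix_split_tags_alt (content : String) : String :=
  String.mk (pvLoopB content.toList (content.toList.length + 1) 0)

-- ===== PRECONDITION & SPEC =====
def Spec_fix_split_tags (content : String) (out : String) : Prop := out = fix_split_tags_alt content
instance (content : String) (out : String) : Decidable (Spec_fix_split_tags content out) := by unfold Spec_fix_split_tags; infer_instance

-- ===== CLAIM (what is proved, stated in full; the proofs are below) =====
def Claim_equal_fix_split_tags : Prop := ∀ (content : String), Dom_fix_split_tags content → Spec_fix_split_tags content (fix_split_tags content)

-- ===== LEMMAS AND PROOFS =====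

-- pair (c1, c2) sits at index i of l
def PairAt (l : List Char) (i : Nat) (c1 c2 : Char) : Prop :=
  l[i]? = some c1 ∧ l[i + 1]? = some c2

-- an opener ('{%' or '{{') sits at index i of l
def OpenAt (l : List Char) (i : Nat) : Prop :=
  PairAt l i '{' '%' ∨ PairAt l i '{' '{'

theorem pair_prefix_iff (t : List Char) (c1 c2 : Char) :
    [c1, c2] <+: t ↔ t[0]? = some c1 ∧ t[1]? = some c2 := by
  constructor
  · rintro ⟨r, rfl⟩; simp
  · rintro ⟨h1, h2⟩
    match t, h1, h2 with
    | a :: b :: r, h1, h2 =>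
      simp only [List.getElem?_cons_zero, Option.some.injEq] at h1
      simp only [List.getElem?_cons_succ, List.getElem?_cons_zero, Option.some.injEq] at h2
      exact ⟨r, by simp [h1, h2]⟩

theorem pairAt_iff_prefix_drop (l : List Char) (i : Nat) (c1 c2 : Char) :
    PairAt l i c1 c2 ↔ [c1, c2] <+: l.drop i := by
  rw [pair_prefix_iff, PairAt]
  simp [List.getElem?_drop]

theorem pairAt_drop (cs : List Char) (k j : Nat) (c1 c2 : Char) :
    PairAt (cs.drop k) j c1 c2 ↔ PairAt cs (k + j) c1 c2 := by
  unfold PairAt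
  rw [List.getElem?_drop, List.getElem?_drop, Nat.add_assoc]

theorem pairAt_lt_length {cs : List Char} {i : Nat} {c1 c2 : Char} (h : PairAt cs i c1 c2) :
    i + 1 < cs.length := by
  have := h.2
  exact (List.getElem?_eq_some_iff.mp this).1

theorem drop_pair {cs : List Char} {q : Nat} {a b : Char} (h : PairAt cs q a b) :
    cs.drop q = a :: b :: cs.drop (q + 2) := by
  have h2 := pairAt_lt_length h
  have h1 : q < cs.length := by omega
  rw [List.drop_eq_getElem_cons h1, List.drop_eq_getElem_cons h2]
  have e1 : cs[q] = a := by
    have := h.1; rw [List.getElem?_eq_getElem h1] at this; simpa using this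
  have e2 : cs[q + 1] = b := by
    have := h.2; rw [List.getElem?_eq_getElem h2] at this; simpa using this
  rw [e1, e2]

-- pvScanClose finds nothing iff the pair does not occur (with both chars in range)
theorem pvScanClose_none_iff (c1 c2 : Char) (l : List Char) :
    pvScanClose c1 c2 l = none ↔ ∀ i, ¬ PairAt l i c1 c2 := by
  induction l with
  | nil => simp [pvScanClose, PairAt]
  | cons a t ih =>
    match t with
    | [] =>
      simp only [pvScanClose, true_iff]
      intro i h
      have := h.2
      simp at this
    | b :: rest =>
      rw [pvScanClose]
      constructor
      · intro h i
        split at h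
        · simp at h
        · next hne =>
          cases hrec : pvScanClose c1 c2 (b :: rest) with
          | some p => rw [hrec] at h; cases p; simp at h
          | none =>
            match i with
            | 0 => intro hp; exact hne ⟨by simpa using hp.1, by simpa using hp.2⟩
            | i + 1 =>
              intro hp
              exact (ih.mp hrec) i ⟨by simpa using hp.1, by simpa using hp.2⟩
      · intro h
        have h0 : ¬ (a = c1 ∧ b = c2) := by
          intro hc
          exact h 0 ⟨by simp [hc.1], by simp [hc.2]⟩
        rw [if_neg h0]
        have : pvScanClose c1 c2 (b :: rest) = none := by
          rw [ih]
          intro i hp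
          exact h (i + 1) ⟨by simpa using hp.1, by simpa using hp.2⟩
        rw [this]

-- pvScanClose splits at the FIRST occurrence of the pair
theorem pvScanClose_first {c1 c2 : Char} {l : List Char} {j : Nat}
    (hj : PairAt l j c1 c2) (hmin : ∀ i < j, ¬ PairAt l i c1 c2) :
    pvScanClose c1 c2 l = some (l.take j, l.drop (j + 2)) := by
  induction l generalizing j with
  | nil => exact absurd hj.1 (by simp)
  | cons a t ih =>
    match t with
    | [] =>
      exfalso
      have := hj.2
      simp at this
    | b :: rest =>
      rw [pvScanClose]
      match j with
      | 0 =>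
        have e1 : a = c1 := by simpa using hj.1
        have e2 : b = c2 := by simpa using hj.2
        rw [if_pos ⟨e1, e2⟩]
        simp
      | k + 1 =>
        have h0 : ¬ (a = c1 ∧ b = c2) := by
          intro hc
          exact hmin 0 (by omega) ⟨by simp [hc.1], by simp [hc.2]⟩
        rw [if_neg h0]
        have hj' : PairAt (b :: rest) k c1 c2 :=
          ⟨by simpa using hj.1, by simpa using hj.2⟩
        have hmin' : ∀ i < k, ¬ PairAt (b :: rest) i c1 c2 := by
          intro i hi hp
          exact hmin (i + 1) (by omega) ⟨by simpa using hp.1, by simpa using hp.2⟩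
        rw [ih hj' hmin']
        simp

theorem openAt_cons (a : Char) (t : List Char) (i : Nat) :
    OpenAt (a :: t) (i + 1) ↔ OpenAt t i := by
  unfold OpenAt PairAt
  simp

-- pvLoopA copies a prefix that contains no opener
theorem pvLoopA_append (u v : List Char)
    (h : ∀ i < u.length, ¬ OpenAt (u ++ v) i) :
    pvLoopA (u ++ v) = u ++ pvLoopA v := by
  induction u with
  | nil => simp
  | cons a u' ih =>
    have hnotopen : ¬ OpenAt (a :: (u' ++ v)) 0 := h 0 (by simp)
    have h' : ∀ i < u'.length, ¬ OpenAt (u' ++ v) i := by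
      intro i hi hp
      exact h (i + 1) (by simp; omega) ((openAt_cons a (u' ++ v) i).mpr hp)
    cases hw : u' ++ v with
    | nil =>
      have hv : v = [] := (List.eq_nil_of_append_eq_nil hw).2
      have hu : u' = [] := (List.append_eq_nil_iff.mp hw).1
      subst hv; subst hu
      simp [pvLoopA]
    | cons b w =>
      have hcond1 : ¬ (a = '{' ∧ b = '%') := by
        intro hc
        exact hnotopen (Or.inl ⟨by simp [hw, hc.1], by simp [hw, hc.2]⟩)
      have hcond2 : ¬ (a = '{' ∧ b = '{') := by
        intro hc
        exact hnotopen (Or.inr ⟨by simp [hw, hc.1], by simp [hw, hc.2]⟩)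
      have : pvLoopA (a :: b :: w) = a :: pvLoopA (b :: w) := by
        rw [pvLoopA, if_neg hcond1, if_neg hcond2]
      rw [List.cons_append, hw, this, ← hw, ih h']
      simp

theorem no_pair_from {cs : List Char} {c1 c2 : Char} {k : Nat} (hk : k ≤ cs.length)
    (h : PySem.Chars.findFrom cs [c1, c2] (k : Int) none = -1) :
    ∀ i, k ≤ i → ¬ PairAt cs i c1 c2 := by
  intro i hik hp
  have hni := (PySem.Chars.findFrom_natCast_eq_neg_one_iff cs [c1, c2] k hk).mp h
  apply hni
  have hp' : PairAt (cs.drop k) (i - k) c1 c2 :=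
    (pairAt_drop cs k (i - k) c1 c2).mpr (by rwa [Nat.add_sub_cancel' hik])
  have hpre := (pairAt_iff_prefix_drop (cs.drop k) (i - k) c1 c2).mp hp'
  exact hpre.isInfix.trans (List.drop_suffix _ _).isInfix

theorem findFrom_pair_spec {cs : List Char} {c1 c2 : Char} {k : Nat} (hk : k ≤ cs.length)
    (h : PySem.Chars.findFrom cs [c1, c2] (k : Int) none ≠ -1) :
    (k : Int) ≤ PySem.Chars.findFrom cs [c1, c2] (k : Int) none ∧
    PairAt cs (PySem.Chars.findFrom cs [c1, c2] (k : Int) none).toNat c1 c2 ∧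
    ∀ i, k ≤ i → i < (PySem.Chars.findFrom cs [c1, c2] (k : Int) none).toNat →
      ¬ PairAt cs i c1 c2 := by
  obtain ⟨h1, h2, h3⟩ := PySem.Chars.findFrom_natCast_spec cs [c1, c2] k hk h
  refine ⟨h1, (pairAt_iff_prefix_drop _ _ _ _).mpr h2, fun i hik hiq hp => h3 i hik hiq ?_⟩
  exact (pairAt_iff_prefix_drop _ _ _ _).mp hp

theorem pvMinFound_spec {p1 p2 : Int} (h : ¬ (p1 = -1 ∧ p2 = -1)) :
    ((pvMinFound p1 p2 = p1 ∧ p1 ≠ -1) ∨ (pvMinFound p1 p2 = p2 ∧ p2 ≠ -1)) ∧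
    (p1 = -1 ∨ pvMinFound p1 p2 ≤ p1) ∧ (p2 = -1 ∨ pvMinFound p1 p2 ≤ p2) := by
  unfold pvMinFound
  split_ifs <;> simp_all [Int.min_def] <;> omega

theorem openAt_drop (cs : List Char) (k i : Nat) :
    OpenAt (cs.drop k) i ↔ OpenAt cs (k + i) := by
  unfold OpenAt
  rw [pairAt_drop, pairAt_drop]

theorem pvLoopA_tag_pct (rest : List Char) :
    pvLoopA ('{' :: '%' :: rest) =
      match pvScanClose '%' '}' rest with
      | some (inner, r) => '{' :: '%' :: (pvCollapse inner ++ (' ' :: '%' :: '}' :: pvLoopA r))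
      | none => '{' :: pvLoopA ('%' :: rest) := by
  rw [pvLoopA]
  cases hs : pvScanClose '%' '}' rest with
  | none => simp
  | some p => cases p; simp

theorem pvLoopA_tag_brace (rest : List Char) :
    pvLoopA ('{' :: '{' :: rest) =
      match pvScanClose '}' '}' rest with
      | some (inner, r) => '{' :: '{' :: (pvCollapse inner ++ (' ' :: '}' :: '}' :: pvLoopA r))
      | none => '{' :: pvLoopA ('{' :: rest) := by
  rw [pvLoopA]
  cases hs : pvScanClose '}' '}' rest with
  | none => simp
  | some p => cases p; simp

-- main loop correspondence
theorem pvLoopB_eq (cs : List Char) :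
    ∀ fuel pos, pos ≤ cs.length → cs.length - pos < fuel →
      pvLoopB cs fuel pos = pvLoopA (cs.drop pos) := by
  intro fuel
  induction fuel with
  | zero => intro pos h1 h2; omega
  | succ fuel ih =>
    intro pos hpos hfuel
    by_cases hlt : pos < cs.length
    case neg =>
      have hdrop : cs.drop pos = [] := List.drop_eq_nil_of_le (by omega)
      rw [pvLoopB, if_neg hlt, hdrop, pvLoopA]
    case pos =>
      rw [pvLoopB, if_pos hlt]
      set p1 := PySem.Chars.findFrom cs ['{', '%'] (pos : Int) none with hp1def
      set p2 := PySem.Chars.findFrom cs ['{', '{'] (pos : Int) none with hp2def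
      by_cases hnone : p1 = -1 ∧ p2 = -1
      · rw [if_pos hnone]
        have hno : ∀ i < (cs.drop pos).length, ¬ OpenAt (cs.drop pos ++ []) i := by
          intro i _ hop
          rw [List.append_nil, openAt_drop] at hop
          rcases hop with hA1 | hA2
          · exact no_pair_from hpos hnone.1 (pos + i) (by omega) hA1
          · exact no_pair_from hpos hnone.2 (pos + i) (by omega) hA2
        have hid := pvLoopA_append (cs.drop pos) [] hno
        simp only [List.append_nil, pvLoopA] at hid
        rw [PySem.List.slice_from cs (by positivity), Int.toNat_natCast, hid]
      · rw [if_neg hnone]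
        obtain ⟨hside, hle1, hle2⟩ := pvMinFound_spec hnone
        set p := pvMinFound p1 p2 with hpdef
        have hq : (pos : Int) ≤ p ∧ OpenAt cs p.toNat := by
          rcases hside with ⟨he, hne⟩ | ⟨he, hne⟩
          · obtain ⟨ha, hb, _⟩ := findFrom_pair_spec (c1 := '{') (c2 := '%') hpos hne
            rw [← hp1def, ← he] at ha hb
            exact ⟨ha, Or.inl hb⟩
          · obtain ⟨ha, hb, _⟩ := findFrom_pair_spec (c1 := '{') (c2 := '{') hpos hne
            rw [← hp2def, ← he] at ha hb
            exact ⟨ha, Or.inr hb⟩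
        set q := p.toNat with hqdef
        have hpq : p = (q : Int) := by
          rw [hqdef, Int.toNat_of_nonneg (le_trans (by positivity) hq.1)]
        have hposq : pos ≤ q := by omega
        have hq1len : q + 1 < cs.length := by
          rcases hq.2 with hp' | hp' <;> exact pairAt_lt_length hp'
        have hminq : ∀ i, pos ≤ i → i < q → ¬ OpenAt cs i := by
          intro i hi1 hi2 hop
          rcases hop with hpa | hpa
          · by_cases he : p1 = -1
            · exact no_pair_from hpos he i hi1 hpa
            · obtain ⟨_, _, hmin⟩ := findFrom_pair_spec (c1 := '{') (c2 := '%') hpos he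
              rw [← hp1def] at hmin
              have hlep : p ≤ p1 := hle1.resolve_left he
              exact hmin i hi1 (by omega) hpa
          · by_cases he : p2 = -1
            · exact no_pair_from hpos he i hi1 hpa
            · obtain ⟨_, _, hmin⟩ := findFrom_pair_spec (c1 := '{') (c2 := '{') hpos he
              rw [← hp2def] at hmin
              have hlep : p ≤ p2 := hle2.resolve_left he
              exact hmin i hi1 (by omega) hpa
        have hqlen : q ≤ cs.length := by omega
        have hulen : ((cs.drop pos).take (q - pos)).length = q - pos := by
          simp
          omega
        have hsplit : (cs.drop pos).take (q - pos) ++ cs.drop q = cs.drop pos := by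
          conv_rhs => rw [← List.take_append_drop (q - pos) (cs.drop pos)]
          rw [List.drop_drop]
          congr 2
          omega
        have hA : pvLoopA (cs.drop pos) = (cs.drop pos).take (q - pos) ++ pvLoopA (cs.drop q) := by
          conv_lhs => rw [← hsplit]
          apply pvLoopA_append
          intro i hi hop
          rw [hsplit, openAt_drop] at hop
          rw [hulen] at hi
          exact hminq (pos + i) (by omega) (by omega) hop
        have hpfx : PySem.List.slice cs (some (pos : Int)) (some p) =
            (cs.drop pos).take (q - pos) := by
          rw [hpq]
          exact PySem.List.slice_natCast cs pos q
        have hgetp : PySem.List.pyGet? cs p = some '{' := by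
          rw [hpq, PySem.List.pyGet?_natCast]
          rcases hq.2 with hp' | hp' <;> exact hp'.1
        have hstart : p + 2 = ((q + 2 : Nat) : Int) := by
          rw [hpq]; push_cast; ring
        have hq2len : q + 2 ≤ cs.length := by omega
        have hcast1 : (p + 1).toNat = q + 1 := by rw [hpq]; omega
        rcases hq.2 with hpair1 | hpair2
        · -- '{%' at q
          have hget : PySem.List.pyGet? cs (p + 1) = some '%' := by
            have h1 : p + 1 = ((q + 1 : Nat) : Int) := by rw [hpq]; push_cast; ring
            rw [h1, PySem.List.pyGet?_natCast]
            exact hpair1.2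
          rw [if_pos hget]
          set close := PySem.Chars.findFrom cs ['%', '}'] (p + 2) none with hclosedef
          have hclose2 : close = PySem.Chars.findFrom cs ['%', '}'] ((q + 2 : Nat) : Int) none := by
            rw [hclosedef, hstart]
          by_cases hc : close = -1
          · rw [if_pos hc]
            have hnoclose : pvScanClose '%' '}' (cs.drop (q + 2)) = none := by
              rw [pvScanClose_none_iff]
              intro j hpj
              have hcs : PairAt cs (q + 2 + j) '%' '}' := (pairAt_drop cs (q + 2) j _ _).mp hpj
              exact no_pair_from hq2len (by rw [← hclose2]; exact hc) (q + 2 + j) (by omega) hcs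
            have hdq1 : cs.drop (q + 1) = '%' :: cs.drop (q + 2) := by
              rw [List.drop_eq_getElem_cons hq1len]
              have := hpair1.2
              rw [List.getElem?_eq_getElem hq1len] at this
              simp only [Option.some.injEq] at this
              rw [this]
            rw [hA, drop_pair hpair1, pvLoopA_tag_pct, hnoclose, hpfx, hgetp,
                hcast1, ih (q + 1) (by omega) (by omega), hdq1]
            simp
          · rw [if_neg hc]
            have hcne : PySem.Chars.findFrom cs ['%', '}'] ((q + 2 : Nat) : Int) none ≠ -1 := by
              rw [← hclose2]; exact hc
            obtain ⟨hcge, hcpair, hcmin⟩ := findFrom_pair_spec hq2len hcne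
            rw [← hclose2] at hcge hcpair hcmin
            have hcnn : (0 : Int) ≤ close := le_trans (by positivity) hcge
            set cN := close.toNat with hcNdef
            have hcq : close = (cN : Int) := by rw [hcNdef, Int.toNat_of_nonneg hcnn]
            have hcge' : q + 2 ≤ cN := by omega
            have hcN1len : cN + 1 < cs.length := pairAt_lt_length hcpair
            have hjpair : PairAt (cs.drop (q + 2)) (cN - (q + 2)) '%' '}' := by
              rw [pairAt_drop]
              have : q + 2 + (cN - (q + 2)) = cN := by omega
              rw [this]
              exact hcpair
            have hjmin : ∀ i < cN - (q + 2), ¬ PairAt (cs.drop (q + 2)) i '%' '}' := by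
              intro i hi hpi
              exact hcmin (q + 2 + i) (by omega) (by omega) ((pairAt_drop cs (q + 2) i _ _).mp hpi)
            have hslice : PySem.List.slice cs (some (p + 2)) (some close) =
                (cs.drop (q + 2)).take (cN - (q + 2)) := by
              rw [hstart, hcq]
              exact PySem.List.slice_natCast cs (q + 2) cN
            have hrest : (cs.drop (q + 2)).drop (cN - (q + 2) + 2) = cs.drop (cN + 2) := by
              rw [List.drop_drop]
              congr 1
              omega
            have hcast2 : (close + 2).toNat = cN + 2 := by omega
            rw [hA, drop_pair hpair1, pvLoopA_tag_pct, pvScanClose_first hjpair hjmin,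
                hpfx, hslice, hrest, hcast2, ih (cN + 2) (by omega) (by omega)]
            simp
        · -- '{{' at q
          have hget : ¬ PySem.List.pyGet? cs (p + 1) = some '%' := by
            have h1 : p + 1 = ((q + 1 : Nat) : Int) := by rw [hpq]; push_cast; ring
            rw [h1, PySem.List.pyGet?_natCast, hpair2.2]
            simp
          rw [if_neg hget]
          set close := PySem.Chars.findFrom cs ['}', '}'] (p + 2) none with hclosedef
          have hclose2 : close = PySem.Chars.findFrom cs ['}', '}'] ((q + 2 : Nat) : Int) none := by
            rw [hclosedef, hstart]
          by_cases hc : close = -1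
          · rw [if_pos hc]
            have hnoclose : pvScanClose '}' '}' (cs.drop (q + 2)) = none := by
              rw [pvScanClose_none_iff]
              intro j hpj
              have hcs : PairAt cs (q + 2 + j) '}' '}' := (pairAt_drop cs (q + 2) j _ _).mp hpj
              exact no_pair_from hq2len (by rw [← hclose2]; exact hc) (q + 2 + j) (by omega) hcs
            have hdq1 : cs.drop (q + 1) = '{' :: cs.drop (q + 2) := by
              rw [List.drop_eq_getElem_cons hq1len]
              have := hpair2.2
              rw [List.getElem?_eq_getElem hq1len] at this
              simp only [Option.some.injEq] at this
              rw [this]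
            rw [hA, drop_pair hpair2, pvLoopA_tag_brace, hnoclose, hpfx, hgetp,
                hcast1, ih (q + 1) (by omega) (by omega), hdq1]
            simp
          · rw [if_neg hc]
            have hcne : PySem.Chars.findFrom cs ['}', '}'] ((q + 2 : Nat) : Int) none ≠ -1 := by
              rw [← hclose2]; exact hc
            obtain ⟨hcge, hcpair, hcmin⟩ := findFrom_pair_spec hq2len hcne
            rw [← hclose2] at hcge hcpair hcmin
            have hcnn : (0 : Int) ≤ close := le_trans (by positivity) hcge
            set cN := close.toNat with hcNdef
            have hcq : close = (cN : Int) := by rw [hcNdef, Int.toNat_of_nonneg hcnn]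
            have hcge' : q + 2 ≤ cN := by omega
            have hcN1len : cN + 1 < cs.length := pairAt_lt_length hcpair
            have hjpair : PairAt (cs.drop (q + 2)) (cN - (q + 2)) '}' '}' := by
              rw [pairAt_drop]
              have : q + 2 + (cN - (q + 2)) = cN := by omega
              rw [this]
              exact hcpair
            have hjmin : ∀ i < cN - (q + 2), ¬ PairAt (cs.drop (q + 2)) i '}' '}' := by
              intro i hi hpi
              exact hcmin (q + 2 + i) (by omega) (by omega) ((pairAt_drop cs (q + 2) i _ _).mp hpi)
            have hslice : PySem.List.slice cs (some (p + 2)) (some close) =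
                (cs.drop (q + 2)).take (cN - (q + 2)) := by
              rw [hstart, hcq]
              exact PySem.List.slice_natCast cs (q + 2) cN
            have hrest : (cs.drop (q + 2)).drop (cN - (q + 2) + 2) = cs.drop (cN + 2) := by
              rw [List.drop_drop]
              congr 1
              omega
            have hcast2 : (close + 2).toNat = cN + 2 := by omega
            rw [hA, drop_pair hpair2, pvLoopA_tag_brace, pvScanClose_first hjpair hjmin,
                hpfx, hslice, hrest, hcast2, ih (cN + 2) (by omega) (by omega)]
            simp

-- ===== VERDICT (by name: the statement is the Claim_ definition above) =====
theorem fix_split_tags_spec : Claim_equal_fix_split_tags := by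
  intro content _
  unfold Spec_fix_split_tags fix_split_tags fix_split_tags_alt
  rw [pvLoopB_eq content.toList (content.toList.length + 1) 0 (by omega) (by omega)]
  simp
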